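-- pv_equiv track=rewrite | github.com/MarryAngel/Competitive_Programming | Beecrowd/python/3060.py | processar_parcelas
-- ===== SOURCE A (Python) =====
-- def processar_parcelas(valor: int, qtd_parcelas: int):
--     resto = valor % qtd_parcelas
--     valor_min = valor // qtd_parcelas
--     parcelas = []
--     for i in range(qtd_parcelas):
--         if i < resto:
--             parcelas.append(valor_min +1)
--         else:
--             parcelas.append(valor_min)
--     return parcelas
-- ===== SOURCE B (Python) =====
-- def processar_parcelas(valor: int, qtd_parcelas: int):
--     # Greedy: each installment is the ceiling of (remaining value / remaining installments).
--     parcelas = []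
--     restante = valor
--     for k in range(qtd_parcelas, 0, -1):
--         p = -(-restante // k)  # ceil division
--         parcelas.append(p)
--         restante -= p
--     return parcelas
-- ===== Notes on version B (the rewrite author's own statement) =====
-- stated objective: alternative
-- what changed: B abandons the precomputed quotient/remainder with a per-index if/else and instead computes each installment greedily as the ceiling of the remaining value over the remaining installment count, subtracting as it goes; no modulo, no precomputed remainder and no branch remain.
import Mathlib
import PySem

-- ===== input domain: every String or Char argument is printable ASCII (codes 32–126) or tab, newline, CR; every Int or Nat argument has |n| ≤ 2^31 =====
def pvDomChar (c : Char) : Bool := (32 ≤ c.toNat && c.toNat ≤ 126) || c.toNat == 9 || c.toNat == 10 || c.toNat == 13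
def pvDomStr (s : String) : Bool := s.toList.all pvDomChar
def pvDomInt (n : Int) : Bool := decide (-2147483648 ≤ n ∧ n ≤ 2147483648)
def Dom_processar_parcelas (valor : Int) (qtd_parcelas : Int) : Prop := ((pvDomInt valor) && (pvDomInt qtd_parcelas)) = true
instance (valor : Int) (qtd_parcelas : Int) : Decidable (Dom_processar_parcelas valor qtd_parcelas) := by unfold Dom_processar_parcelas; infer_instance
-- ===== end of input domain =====

-- B computes each installment greedily as the ceiling of remaining value / remaining installments, subtracting as it goes, instead of A's precomputed quotient/remainder with a per-index if/else (objective: alternative).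


-- ===== PORT A =====
-- loop: for i in range(qtd_parcelas): append valor_min+1 if i < resto else valor_min
def processar_parcelas (valor : Int) (qtd_parcelas : Int) : List Int :=
  (PySem.List.pyRange 0 qtd_parcelas 1).foldl
    (fun parcelas i =>
      if i < PySem.Int.mod valor qtd_parcelas then
        parcelas ++ [PySem.Int.floordiv valor qtd_parcelas + 1]
      else
        parcelas ++ [PySem.Int.floordiv valor qtd_parcelas]) []

-- ===== PORT B =====
-- greedy: for k in range(qtd_parcelas, 0, -1): p = -(-restante // k); append p; restante -= p
def processar_parcelas_alt (valor : Int) (qtd_parcelas : Int) : List Int :=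
  ((PySem.List.pyRange qtd_parcelas 0 (-1)).foldl
    (fun (st : List Int × Int) k =>
      let p := -(PySem.Int.floordiv (-st.2) k)
      (st.1 ++ [p], st.2 - p)) ([], valor)).1

-- ===== PRECONDITION & SPEC =====
-- A raises ZeroDivisionError when qtd_parcelas = 0; those inputs are excluded.
def Pre_processar_parcelas (valor : Int) (qtd_parcelas : Int) : Prop := qtd_parcelas ≠ 0
instance (valor : Int) (qtd_parcelas : Int) : Decidable (Pre_processar_parcelas valor qtd_parcelas) := by unfold Pre_processar_parcelas; infer_instance
def pvWitness_processar_parcelas : Int × Int := (13, 4)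
def Spec_processar_parcelas (valor : Int) (qtd_parcelas : Int) (out : List Int) : Prop := out = processar_parcelas_alt valor qtd_parcelas
instance (valor : Int) (qtd_parcelas : Int) (out : List Int) : Decidable (Spec_processar_parcelas valor qtd_parcelas out) := by unfold Spec_processar_parcelas; infer_instance

-- ===== CLAIM (what is proved, stated in full; the proofs are below) =====
def Claim_equal_processar_parcelas : Prop := ∀ (valor : Int) (qtd_parcelas : Int), Dom_processar_parcelas valor qtd_parcelas → Pre_processar_parcelas valor qtd_parcelas → Spec_processar_parcelas valor qtd_parcelas (processar_parcelas valor qtd_parcelas)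

-- ===== LEMMAS AND PROOFS =====
-- A's range-map of a two-valued step function is two replicate blocks
theorem map_range_ite_eq_replicate (n r : Nat) (x y : Int) (h : r ≤ n) :
    (List.range n).map (fun i : Nat => if (i : Int) < (r : Int) then x else y) =
      List.replicate r x ++ List.replicate (n - r) y := by
  apply List.ext_getElem
  · simp [h]
  · intro i h1 h2
    simp only [List.getElem_map, List.getElem_range]
    by_cases hi : i < r
    · rw [List.getElem_append_left (by simpa using hi)]
      simp [Int.ofNat_lt.mpr hi]
    · rw [List.getElem_append_right (by simpa using hi)]
      have : ¬ ((i : Int) < (r : Int)) := by exact_mod_cast hi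
      simp [this]

-- ceiling division via Python floordiv: -((-v) // k) for positive k
theorem ceil_via_floordiv (v k : Int) (hk : 0 < k) :
    -(PySem.Int.floordiv (-v) k) = if v % k = 0 then v / k else v / k + 1 := by
  rw [PySem.Int.floordiv_eq_ediv_of_pos hk]
  have h1 : k * (v / k) + v % k = v := Int.ediv_add_emod v k
  have h2 : k * (-v / k) + -v % k = -v := Int.ediv_add_emod (-v) k
  have h3 := Int.emod_nonneg v (by omega : k ≠ 0)
  have h4 := Int.emod_nonneg (-v) (by omega : k ≠ 0)
  have h5 := Int.emod_lt_of_pos v hk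
  have h6 := Int.emod_lt_of_pos (-v) hk
  have hsum : k * (v / k + -v / k) + (v % k + -v % k) = 0 := by ring_nf; linarith [h1, h2]
  split_ifs with h
  · -- k divides v, so it divides -v and -v % k = 0
    have hdvd : k ∣ v := Int.dvd_of_emod_eq_zero h
    have : -v % k = 0 := Int.emod_eq_zero_of_dvd (Dvd.dvd.neg_right hdvd)
    have ht : v / k + -v / k = 0 := by
      by_contra hne
      rcases lt_or_gt_of_ne hne with hlt | hgt
      · have h7 : v / k + -v / k ≤ -1 := by omega
        have := mul_le_mul_of_nonneg_left h7 hk.le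
        omega
      · have h7 : 1 ≤ v / k + -v / k := by omega
        have := mul_le_mul_of_nonneg_left h7 hk.le
        omega
    omega
  · -- r > 0: the quotients sum to -1
    have hs0 : ¬ (-v % k = 0) := by
      intro hs
      have : k ∣ -v := Int.dvd_of_emod_eq_zero hs
      have : k ∣ v := (dvd_neg.mp this)
      exact h (Int.emod_eq_zero_of_dvd this)
    have ht : v / k + -v / k = -1 := by
      by_contra hne
      rcases lt_or_gt_of_ne hne with hlt | hgt
      · have h7 : v / k + -v / k ≤ -2 := by omega
        have := mul_le_mul_of_nonneg_left h7 hk.le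
        omega
      · have h7 : 0 ≤ v / k + -v / k := by omega
        have := mul_le_mul_of_nonneg_left h7 hk.le
        omega
    omega

-- B's greedy fold over the countdown range produces the same two replicate blocks
theorem greedy_blocks (n : Nat) (hn : 0 < n) : ∀ (v : Int) (acc : List Int),
    (PySem.List.pyRange (n : Int) 0 (-1)).foldl
      (fun (st : List Int × Int) k =>
        let p := -(PySem.Int.floordiv (-st.2) k)
        (st.1 ++ [p], st.2 - p)) (acc, v) =
    (acc ++ List.replicate (v % (n : Int)).toNat (v / (n : Int) + 1)
         ++ List.replicate (n - (v % (n : Int)).toNat) (v / (n : Int)), 0) := by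
  induction n with
  | zero => omega
  | succ m ih =>
    intro v acc
    have hpos : (0 : Int) < ((m + 1 : Nat) : Int) := by exact_mod_cast Nat.succ_pos m
    rw [PySem.List.pyRange_neg_one_cons (by exact_mod_cast Nat.succ_pos m)]
    rw [List.foldl_cons]
    simp only []
    set N : Int := ((m + 1 : Nat) : Int) with hN
    have hNm : N - 1 = (m : Int) := by rw [hN]; push_cast; ring
    have hq : N * (v / N) + v % N = v := Int.ediv_add_emod v N
    have hr0 : 0 ≤ v % N := Int.emod_nonneg v (by omega)
    have hrlt : v % N < N := Int.emod_lt_of_pos v hpos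
    have hceil := ceil_via_floordiv v N hpos
    by_cases hz : v % N = 0
    · -- exact division: installment v/N, remainder stays 0
      rw [hceil, if_pos hz]
      rcases Nat.eq_zero_or_pos m with hm | hm
      · subst hm
        rw [hNm, PySem.List.pyRange_neg_one_eq_nil (by norm_num)]
        have hN1 : N = 1 := by rw [hN]; norm_num
        simp [hN1]
      · have hm0 : (m : Int) ≠ 0 := by exact_mod_cast hm.ne'
        have hvq : v - v / N = (m : Int) * (v / N) := by
          have hNv : v = N * (v / N) := by omega
          rw [hN] at hNv ⊢; push_cast at hNv ⊢; nlinarith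
        have hd : (v - v / N) / (m : Int) = v / N := by
          rw [hvq, Int.mul_ediv_cancel_left _ hm0]
        have hm2 : (v - v / N) % (m : Int) = 0 := by
          rw [hvq, Int.mul_emod_right]
        rw [hNm, ih hm (v - v / N) (acc ++ [v / N])]
        rw [hd, hm2, hz]
        simp [List.replicate_succ]
    · -- nonzero remainder r: installment v/N + 1, remainder drops to r - 1 over m parcels
      rw [hceil, if_neg hz]
      have hm : 0 < m := by
        rcases Nat.eq_zero_or_pos m with hm0 | hm0
        · exfalso; subst hm0
          have : N = 1 := by rw [hN]; norm_num
          rw [this] at hz; exact hz (Int.emod_one v)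
        · exact hm0
      have hm0 : (m : Int) ≠ 0 := by exact_mod_cast hm.ne'
      have hrm : v % N - 1 < (m : Int) := by omega
      have hvq : v - (v / N + 1) = (v % N - 1) + (m : Int) * (v / N) := by
        rw [hN] at hq ⊢; push_cast at hq ⊢; nlinarith
      have hd : (v - (v / N + 1)) / (m : Int) = v / N := by
        rw [hvq, Int.add_mul_ediv_left _ _ hm0,
            Int.ediv_eq_zero_of_lt (by omega) hrm, zero_add]
      have hm2 : (v - (v / N + 1)) % (m : Int) = v % N - 1 := by
        rw [hvq, Int.add_mul_emod_self_left, Int.emod_eq_of_lt (by omega) hrm]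
      rw [hNm, ih hm (v - (v / N + 1)) (acc ++ [v / N + 1])]
      rw [hd, hm2]
      have h1 : (v % N).toNat = (v % N - 1).toNat + 1 := by omega
      have h2 : m + 1 - (v % N).toNat = m - (v % N - 1).toNat := by omega
      rw [h1]
      simp [List.replicate_succ, Nat.succ_sub_succ]

-- ===== VERDICT =====
theorem processar_parcelas_spec : Claim_equal_processar_parcelas := by
  intro valor qtd_parcelas _ hq
  unfold Spec_processar_parcelas processar_parcelas processar_parcelas_alt
  rcases lt_trichotomy qtd_parcelas 0 with hneg | hzero | hpos
  · -- both ranges are empty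
    rw [PySem.List.pyRange_one_eq_nil (by omega), PySem.List.pyRange_neg_one_eq_nil (by omega)]
    simp
  · exact absurd hzero hq
  · obtain ⟨n, rfl⟩ : ∃ n : Nat, qtd_parcelas = (n : Int) :=
      ⟨qtd_parcelas.toNat, (Int.toNat_of_nonneg hpos.le).symm⟩
    have hn : 0 < n := by exact_mod_cast hpos
    rw [greedy_blocks n hn valor []]
    rw [PySem.List.pyRange_zero_natCast]
    rw [PySem.Int.mod_eq_emod_of_pos hpos, PySem.Int.floordiv_eq_ediv_of_pos hpos]
    have hr0 : 0 ≤ valor % (n : Int) := Int.emod_nonneg valor (by omega)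
    have hrlt : valor % (n : Int) < (n : Int) := Int.emod_lt_of_pos valor hpos
    have hfold : ∀ (acc : List Int),
        (List.map (fun k : Nat => (k : Int)) (List.range n)).foldl
          (fun parcelas i =>
            if i < valor % (n : Int) then
              parcelas ++ [valor / (n : Int) + 1]
            else
              parcelas ++ [valor / (n : Int)]) acc =
        acc ++ (List.range n).map
          (fun i : Nat => if (i : Int) < valor % (n : Int) then
              valor / (n : Int) + 1
            else valor / (n : Int)) := by
      intro acc
      rw [List.foldl_map]
      induction (List.range n) generalizing acc with
      | nil => simp
      | cons a t iht =>
          simp only [List.foldl_cons, List.map_cons, iht]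
          by_cases hc : (a : Int) < valor % (n : Int) <;> simp [hc]
    rw [hfold, List.nil_append]
    rw [show valor % (n : Int) = (((valor % (n : Int)).toNat : Nat) : Int) by omega]
    rw [map_range_ite_eq_replicate _ _ _ _ (by omega)]
    have : (max (valor % (n : Int)) 0).toNat = (valor % (n : Int)).toNat := by omega
    simp [this]
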